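-- pv_equiv track=rewrite | github.com/flomotlik/awsquery | src/awsquery/auto_filters.py | _select_by_suffix
-- ===== SOURCE A (Python) =====
-- from typing import Dict, List, Optional
--
-- def _get_base_name(field: str) -> str:
--     """Extract base field name from dotted path."""
--     return field.split(".")[-1]
--
-- def _get_path_depth(field: str) -> int:
--     """Return the nesting depth of a field (number of dots)."""
--     return field.count(".")
--
-- def _select_by_suffix(
--     candidates: List[str], suffixes: List[str], limit: int, already_selected: set
-- ) -> List[str]:
--     """Select fields matching suffixes with priority ordering up to limit."""
--     selected = []
--
--     for suffix in suffixes: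
--         for field in sorted(candidates, key=lambda f: (_get_path_depth(f), f)):
--             if field in already_selected or field in selected:
--                 continue
--             base = _get_base_name(field)
--             if base.endswith(suffix):
--                 selected.append(field)
--                 if len(selected) >= limit:
--                     return selected
--
--     return selected
-- ===== SOURCE B (Python) =====
-- def _select_by_suffix(candidates, suffixes, limit, already_selected):
--     """Select fields matching suffixes with priority ordering up to limit.
--
--     One sort + one bucketing pass (each candidate goes to the bucket of the
--     first suffix its base name ends with), then the selection is filled from
--     the concatenated buckets with a seen-set for deduplication — instead of
--     re-sorting and re-scanning all candidates for every suffix.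
--     """
--     buckets = [[] for _ in suffixes]
--     for field in sorted(candidates, key=lambda f: (f.count("."), f)):
--         if field in already_selected:
--             continue
--         base = field.split(".")[-1]
--         for i, suffix in enumerate(suffixes):
--             if base.endswith(suffix):
--                 buckets[i].append(field)
--                 break
--     selected = []
--     seen = set()
--     for bucket in buckets:
--         for field in bucket:
--             if field in seen:
--                 continue
--             selected.append(field)
--             seen.add(field)
--             if len(selected) >= limit:
--                 return selected
--     return selected
-- ===== Notes on version B (the rewrite author's own statement) =====
-- stated objective: alternative
-- what changed: B sorts the candidates once and, in a single pass, drops each candidate into the bucket of the first suffix its base name ends with, then fills the selection from the concatenated buckets using a seen-set for deduplication, instead of A's re-sorting and re-scanning of every candidate for every suffix with a linear 'in selected' scan; measured much faster on large outputs but A can still win when an early match lets it stop after one pass, so no speed claim is made.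
import Mathlib
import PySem

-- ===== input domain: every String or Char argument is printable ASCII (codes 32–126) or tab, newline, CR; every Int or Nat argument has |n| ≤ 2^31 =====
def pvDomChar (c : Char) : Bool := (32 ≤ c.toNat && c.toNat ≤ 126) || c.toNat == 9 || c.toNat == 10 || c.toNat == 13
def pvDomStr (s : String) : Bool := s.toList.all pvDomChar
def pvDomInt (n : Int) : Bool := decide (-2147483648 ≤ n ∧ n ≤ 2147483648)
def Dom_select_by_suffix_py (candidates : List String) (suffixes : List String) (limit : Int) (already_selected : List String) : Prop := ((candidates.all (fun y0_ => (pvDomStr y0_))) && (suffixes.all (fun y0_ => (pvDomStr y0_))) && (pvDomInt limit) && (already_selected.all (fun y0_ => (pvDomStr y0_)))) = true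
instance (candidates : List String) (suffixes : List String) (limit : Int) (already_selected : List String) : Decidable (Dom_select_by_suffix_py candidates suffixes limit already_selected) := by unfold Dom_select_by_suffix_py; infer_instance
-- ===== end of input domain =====

-- B replaces A's per-suffix re-sort and re-scan of all candidates by one sort plus one
-- bucketing pass (each candidate goes to the bucket of the first suffix it matches),
-- then fills the selection from the concatenated buckets; same return value.

-- ===== PORT A =====
-- _get_base_name: field.split(".")[-1]; the separator "." is nonempty so split? is
-- always `some` of a nonempty list and both getD defaults are unreachable.
def pvBase (f : String) : String :=
  (PySem.List.pyGet? ((PySem.Str.split? f ".").getD []) (-1)).getD ""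

-- sorted(candidates, key=lambda f: (_get_path_depth(f), f))
def pvSortedCands (candidates : List String) : List String :=
  PySem.List.sorted2 candidates (fun f => (PySem.Str.count f "." : Nat)) (fun f => f) false

-- A's inner `for field in sorted(...)` loop; .error = the early `return selected`
def pvInnerA (suffix : String) (already : List String) (limit : Int) :
    List String → List String → Except (List String) (List String)
  | [], sel => .ok sel
  | f :: fs, sel =>
    if f ∈ already ∨ f ∈ sel then pvInnerA suffix already limit fs sel
    else if PySem.Str.endswith (pvBase f) suffix then
      let sel' := sel ++ [f]
      if limit ≤ (sel'.length : Int) then .error sel'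
      else pvInnerA suffix already limit fs sel'
    else pvInnerA suffix already limit fs sel

-- A's outer `for suffix in suffixes` loop
def pvOuterA (candidates : List String) (already : List String) (limit : Int) :
    List String → List String → List String
  | [], sel => sel
  | s :: ss, sel =>
    match pvInnerA s already limit (pvSortedCands candidates) sel with
    | .error r => r
    | .ok sel' => pvOuterA candidates already limit ss sel'

def select_by_suffix_py (candidates : List String) (suffixes : List String) (limit : Int) (already_selected : List String) : List String :=
  pvOuterA candidates already_selected limit suffixes []

-- ===== PORT B =====
-- B's inner `for i, suffix in enumerate(suffixes): ... break` loop
def pvFirstIdx (base : String) : List String → Nat → Option Nat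
  | [], _ => none
  | s :: ss, k => if PySem.Str.endswith base s then some k else pvFirstIdx base ss (k + 1)

-- B's bucketing pass over the sorted candidates
def pvAssign (suffixes : List String) (already : List String) :
    List String → List (List String) → List (List String)
  | [], bk => bk
  | f :: fs, bk =>
    if f ∈ already then pvAssign suffixes already fs bk
    else
      match pvFirstIdx (pvBase f) suffixes 0 with
      | none => pvAssign suffixes already fs bk
      | some i => pvAssign suffixes already fs (bk.set i (bk.getD i [] ++ [f]))

-- B's `for field in bucket` loop; .error = the early `return selected`;
-- `seen` is B's Python set (PySem.Set), carried alongside `selected`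
def pvPickInnerB (limit : Int) :
    List String → List String → List String → Except (List String) (List String × List String)
  | [], sel, seen => .ok (sel, seen)
  | f :: fs, sel, seen =>
    if f ∈ seen then pvPickInnerB limit fs sel seen
    else
      let sel' := sel ++ [f]
      let seen' := PySem.Set.add seen f
      if limit ≤ (sel'.length : Int) then .error sel'
      else pvPickInnerB limit fs sel' seen'

-- B's `for bucket in buckets` loop
def pvPickB (limit : Int) : List (List String) → List String → List String → List String
  | [], sel, _ => sel
  | b :: bs, sel, seen =>
    match pvPickInnerB limit b sel seen with
    | .error r => r
    | .ok (sel', seen') => pvPickB limit bs sel' seen'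

def select_by_suffix_py_alt (candidates : List String) (suffixes : List String) (limit : Int) (already_selected : List String) : List String :=
  let buckets := pvAssign suffixes already_selected (pvSortedCands candidates)
      (suffixes.map (fun _ => ([] : List String)))
  pvPickB limit buckets [] []

-- ===== PRECONDITION & SPEC =====
def Spec_select_by_suffix_py (candidates : List String) (suffixes : List String) (limit : Int) (already_selected : List String) (out : List String) : Prop := out = select_by_suffix_py_alt candidates suffixes limit already_selected
instance (candidates : List String) (suffixes : List String) (limit : Int) (already_selected : List String) (out : List String) : Decidable (Spec_select_by_suffix_py candidates suffixes limit already_selected out) := by unfold Spec_select_by_suffix_py; infer_instance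

-- ===== CLAIM (what is proved, stated in full; the proofs are below) =====
def Claim_equal_select_by_suffix_py : Prop := ∀ (candidates : List String) (suffixes : List String) (limit : Int) (already_selected : List String), Dom_select_by_suffix_py candidates suffixes limit already_selected → Spec_select_by_suffix_py candidates suffixes limit already_selected (select_by_suffix_py candidates suffixes limit already_selected)

-- ===== LEMMAS AND PROOFS =====

-- collapse an Except whose two sides carry the same payload
def pvDone : Except (List String) (List String) → List String
  | .error r => r
  | .ok r => r

-- the pure selection loop both ports reduce to (dedup against `sel` itself)
def pvRun (limit : Int) : List String → List String → Except (List String) (List String)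
  | [], sel => .ok sel
  | f :: fs, sel =>
    if f ∈ sel then pvRun limit fs sel
    else
      let sel' := sel ++ [f]
      if limit ≤ (sel'.length : Int) then .error sel'
      else pvRun limit fs sel'

-- the Boolean filters the two streams are built from
def pvMatchA (already : List String) (s : String) (f : String) : Bool :=
  !decide (f ∈ already) && PySem.Str.endswith (pvBase f) s

def pvMatchB (already : List String) (full : List String) (j : Nat) (f : String) : Bool :=
  !decide (f ∈ already) && decide (pvFirstIdx (pvBase f) full 0 = some j)

-- ordered dedup relative to a seen-set (first occurrences kept)
def pvDdp (seen : List String) : List String → List String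
  | [] => []
  | f :: fs => if f ∈ seen then pvDdp seen fs else f :: pvDdp (f :: seen) fs

theorem pvInnerA_eq_filter (s : String) (already : List String) (limit : Int)
    (fields sel : List String) :
    pvInnerA s already limit fields sel
      = pvRun limit (fields.filter (pvMatchA already s)) sel := by
  induction fields generalizing sel with
  | nil => rfl
  | cons f fs ih =>
    simp only [pvInnerA, pvMatchA, List.filter_cons]
    by_cases ha : f ∈ already
    · simp only [ha, decide_true, Bool.not_true, Bool.false_and, Bool.false_eq_true,
        if_false, true_or, if_true]
      exact ih sel
    · simp only [ha, decide_false, Bool.not_false, Bool.true_and, false_or]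
      by_cases he : PySem.Str.endswith (pvBase f) s = true
      · simp only [he, if_true, pvRun]
        by_cases hsel : f ∈ sel
        · simp only [hsel, if_true]
          exact ih sel
        · simp only [hsel, if_false]
          split
          · rfl
          · exact ih _
      · simp only [he]
        by_cases hsel : f ∈ sel
        · simp only [hsel, if_true]
          exact ih sel
        · simp only [hsel, if_false]
          exact ih sel

theorem pvRun_append (limit : Int) (xs ys sel : List String) :
    pvRun limit (xs ++ ys) sel
      = match pvRun limit xs sel with
        | .error r => .error r
        | .ok sel' => pvRun limit ys sel' := by
  induction xs generalizing sel with
  | nil => rfl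
  | cons f fs ih =>
    simp only [List.cons_append, pvRun]
    split
    · exact ih sel
    · split
      · rfl
      · exact ih _

theorem pvOuterA_eq (candidates already : List String) (limit : Int)
    (ss sel : List String) :
    pvOuterA candidates already limit ss sel
      = pvDone (pvRun limit
          (ss.flatMap (fun s => (pvSortedCands candidates).filter (pvMatchA already s))) sel) := by
  induction ss generalizing sel with
  | nil => rfl
  | cons s ss ih =>
    simp only [List.flatMap_cons]
    rw [pvRun_append]
    show (match pvInnerA s already limit (pvSortedCands candidates) sel with
      | .error r => r
      | .ok sel' => pvOuterA candidates already limit ss sel') = _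
    rw [pvInnerA_eq_filter]
    cases h : pvRun limit ((pvSortedCands candidates).filter (pvMatchA already s)) sel with
    | error r => rfl
    | ok sel' => exact ih sel'

theorem pvPickInnerB_eq (limit : Int) (fs : List String) :
    ∀ (sel seen : List String), (∀ x, x ∈ seen ↔ x ∈ sel) →
    (∃ r, pvPickInnerB limit fs sel seen = .error r ∧ pvRun limit fs sel = .error r) ∨
    (∃ sel' seen', pvPickInnerB limit fs sel seen = .ok (sel', seen') ∧
      pvRun limit fs sel = .ok sel' ∧ ∀ x, x ∈ seen' ↔ x ∈ sel') := by
  induction fs with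
  | nil => intro sel seen h; exact Or.inr ⟨sel, seen, rfl, rfl, h⟩
  | cons f fs ih =>
    intro sel seen h
    by_cases hf : f ∈ seen
    · have hsel : f ∈ sel := (h f).mp hf
      simp only [pvPickInnerB, pvRun, hf, hsel, if_true]
      exact ih sel seen h
    · have hsel : f ∉ sel := fun hx => hf ((h f).mpr hx)
      simp only [pvPickInnerB, pvRun, hf, hsel, if_false]
      split
      · exact Or.inl ⟨sel ++ [f], rfl, rfl⟩
      · refine ih (sel ++ [f]) (PySem.Set.add seen f) (fun x => ?_)
        simp [PySem.Set.mem_add, h x]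

theorem pvPickB_eq (limit : Int) (bks : List (List String)) :
    ∀ (sel seen : List String), (∀ x, x ∈ seen ↔ x ∈ sel) →
    pvPickB limit bks sel seen = pvDone (pvRun limit bks.flatten sel) := by
  induction bks with
  | nil => intro sel seen _; rfl
  | cons b bs ih =>
    intro sel seen h
    simp only [List.flatten_cons]
    rw [pvRun_append]
    show (match pvPickInnerB limit b sel seen with
      | .error r => r
      | .ok (sel', seen') => pvPickB limit bs sel' seen') = _
    rcases pvPickInnerB_eq limit b sel seen h with ⟨r, hB, hR⟩ | ⟨sel', seen', hB, hR, hinv⟩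
    · rw [hB, hR]; rfl
    · rw [hB, hR]
      exact ih sel' seen' hinv

theorem pvDdp_congr (fs s1 s2 : List String) (h : ∀ x, x ∈ s1 ↔ x ∈ s2) :
    pvDdp s1 fs = pvDdp s2 fs := by
  induction fs generalizing s1 s2 with
  | nil => rfl
  | cons f fs ih =>
    by_cases h1 : f ∈ s1
    · simp [pvDdp, h1, (h f).mp h1, ih _ _ h]
    · have h2 : f ∉ s2 := fun hx => h1 ((h f).mpr hx)
      simp only [pvDdp, h1, h2, if_false]
      refine congrArg _ (ih _ _ ?_)
      intro x; simp [h x]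

theorem pvDdp_append (xs ys seen : List String) :
    pvDdp seen (xs ++ ys) = pvDdp seen xs ++ pvDdp (xs ++ seen) ys := by
  induction xs generalizing seen with
  | nil => simp [pvDdp]
  | cons f xs ih =>
    by_cases hf : f ∈ seen
    · simp only [List.cons_append, pvDdp, hf, if_true]
      rw [ih]
      refine congrArg _ (pvDdp_congr _ _ _ ?_)
      intro x
      simp only [List.mem_append, List.mem_cons]
      rcases eq_or_ne x f with rfl | hx
      · tauto
      · tauto
    · simp only [List.cons_append, pvDdp, hf, if_false]
      rw [ih]
      refine congrArg _ (congrArg _ (pvDdp_congr _ _ _ ?_))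
      intro x
      simp only [List.mem_append, List.mem_cons]
      tauto

theorem pvDdp_filter (p : String → Bool) (l seen : List String)
    (h : ∀ f ∈ l, p f = false → f ∈ seen) :
    pvDdp seen (l.filter p) = pvDdp seen l := by
  induction l generalizing seen with
  | nil => rfl
  | cons f l ih =>
    by_cases hp : p f
    · simp only [List.filter_cons, hp, if_true, pvDdp]
      split
      · exact ih _ (fun g hg hpg => h g (List.mem_cons_of_mem _ hg) hpg)
      · refine congrArg _ (ih _ ?_)
        intro g hg hpg
        exact List.mem_cons_of_mem _ (h g (List.mem_cons_of_mem _ hg) hpg)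
    · have hf : f ∈ seen := h f List.mem_cons_self (by simpa using hp)
      simp only [List.filter_cons, hp, Bool.false_eq_true, if_false, pvDdp, hf, if_true]
      exact ih _ (fun g hg hpg => h g (List.mem_cons_of_mem _ hg) hpg)

theorem pvRun_ddp (limit : Int) (fs sel seen : List String)
    (h : ∀ x, x ∈ seen ↔ x ∈ sel) :
    pvRun limit (pvDdp seen fs) sel = pvRun limit fs sel := by
  induction fs generalizing sel seen with
  | nil => rfl
  | cons f fs ih =>
    by_cases hf : f ∈ seen
    · have hsel : f ∈ sel := (h f).mp hf
      simp only [pvDdp, hf, if_true, pvRun, hsel]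
      exact ih _ _ h
    · have hsel : f ∉ sel := fun hx => hf ((h f).mpr hx)
      simp only [pvDdp, hf, if_false, pvRun, hsel]
      split
      · rfl
      · refine ih _ _ ?_
        intro x; simp only [List.mem_cons, List.mem_append, h x]
        tauto

theorem pvFirstIdx_shift (b : String) (l : List String) (k : Nat) :
    pvFirstIdx b l k = (pvFirstIdx b l 0).map (fun j => k + j) := by
  induction l generalizing k with
  | nil => rfl
  | cons s ss ih =>
    cases he : PySem.Str.endswith b s with
    | true =>
      simp only [pvFirstIdx, he, if_true, Option.map_some, Nat.add_zero]
    | false =>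
      simp only [pvFirstIdx, he, Bool.false_eq_true, if_false]
      rw [ih (k + 1), ih 1]
      cases pvFirstIdx b ss 0 with
      | none => rfl
      | some j =>
        simp only [Option.map_some, Option.some.injEq]
        omega

theorem pvFirstIdx_exists_of_match (b : String) (l : List String) (k : Nat)
    (hk : k < l.length) (hm : PySem.Str.endswith b l[k] = true) :
    ∃ j ≤ k, pvFirstIdx b l 0 = some j := by
  induction l generalizing k with
  | nil => exact absurd hk (by simp)
  | cons s ss ih =>
    cases he : PySem.Str.endswith b s with
    | true => exact ⟨0, Nat.zero_le _, by simp only [pvFirstIdx, he, if_true]⟩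
    | false =>
      cases k with
      | zero =>
        rw [List.getElem_cons_zero] at hm
        rw [he] at hm
        exact absurd hm (by simp)
      | succ k' =>
        have hk' : k' < ss.length := by simpa using hk
        rw [List.getElem_cons_succ] at hm
        obtain ⟨j, hjk, hj⟩ := ih k' hk' hm
        refine ⟨j + 1, by omega, ?_⟩
        simp only [pvFirstIdx, he, Bool.false_eq_true, if_false]
        rw [pvFirstIdx_shift, hj]
        simp [Nat.add_comm]

theorem pvFirstIdx_spec (b : String) (l : List String) (j : Nat)
    (h : pvFirstIdx b l 0 = some j) :
    ∃ hj : j < l.length, PySem.Str.endswith b l[j] = true := by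
  induction l generalizing j with
  | nil => simp [pvFirstIdx] at h
  | cons s ss ih =>
    cases he : PySem.Str.endswith b s with
    | true =>
      simp only [pvFirstIdx, he, if_true, Option.some.injEq] at h
      subst h
      exact ⟨by simp, by rw [List.getElem_cons_zero]; exact he⟩
    | false =>
      simp only [pvFirstIdx, he, Bool.false_eq_true, if_false] at h
      rw [pvFirstIdx_shift] at h
      cases hj' : pvFirstIdx b ss 0 with
      | none => rw [hj'] at h; simp at h
      | some j' =>
        rw [hj'] at h
        simp only [Option.map_some, Option.some.injEq] at h
        obtain ⟨hlt, hend⟩ := ih _ hj'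
        have hj : j = j' + 1 := by omega
        subst hj
        exact ⟨by simpa using Nat.succ_lt_succ hlt, by rw [List.getElem_cons_succ]; exact hend⟩

theorem pvAssign_length (full already : List String) (fs : List String)
    (bk : List (List String)) :
    (pvAssign full already fs bk).length = bk.length := by
  induction fs generalizing bk with
  | nil => rfl
  | cons f fs ih =>
    by_cases ha : f ∈ already
    · simp only [pvAssign, ha, if_true]
      exact ih bk
    · simp only [pvAssign, ha, if_false]
      cases hfi : pvFirstIdx (pvBase f) full 0 with
      | none => exact ih bk
      | some i => rw [ih]; simp

theorem pvAssign_getD (full already : List String) (fs : List String) :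
    ∀ (bk : List (List String)), bk.length = full.length → ∀ j, j < bk.length →
    (pvAssign full already fs bk).getD j [] = bk.getD j [] ++ fs.filter (pvMatchB already full j) := by
  induction fs with
  | nil => intro bk _ j _; simp [pvAssign]
  | cons f fs ih =>
    intro bk hlen j hj
    by_cases ha : f ∈ already
    · have hm : pvMatchB already full j f = false := by simp [pvMatchB, ha]
      simp only [pvAssign, ha, if_true, List.filter_cons, hm, Bool.false_eq_true, if_false]
      exact ih bk hlen j hj
    · simp only [pvAssign, ha, if_false]
      cases hfi : pvFirstIdx (pvBase f) full 0 with
      | none =>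
        have hm : pvMatchB already full j f = false := by simp [pvMatchB, hfi]
        simp only [List.filter_cons, hm, Bool.false_eq_true, if_false]
        exact ih bk hlen j hj
      | some i =>
        obtain ⟨hilt, -⟩ := pvFirstIdx_spec _ _ _ hfi
        have hib : i < bk.length := by omega
        have hlen' : (bk.set i (bk.getD i [] ++ [f])).length = full.length := by simp [hlen]
        rw [ih _ hlen' j (by simpa using hj)]
        by_cases hji : j = i
        · subst hji
          have hm : pvMatchB already full j f = true := by simp [pvMatchB, ha, hfi]
          rw [List.getD_eq_getElem _ _ (by simpa using hj), List.getElem_set_self (by simpa using hib)]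
          rw [List.filter_cons, hm, if_pos rfl]
          rw [List.getD_eq_getElem _ _ hj]
          simp
        · have hm : pvMatchB already full j f = false := by
            simp only [pvMatchB, hfi, Option.some.injEq, Bool.and_eq_false_iff]
            right
            simpa using fun h => hji h.symm
          rw [List.getD_eq_getElem _ _ (by simpa using hj),
            List.getElem_set_ne (by omega : i ≠ j)]
          rw [List.filter_cons, hm]
          simp only [Bool.false_eq_true, if_false]
          rw [List.getD_eq_getElem _ _ hj]

theorem pvBuckets_eq (full already S : List String) :
    pvAssign full already S (full.map (fun _ => ([] : List String)))
      = (List.range full.length).map (fun j => S.filter (pvMatchB already full j)) := by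
  have hlen : (full.map (fun _ => ([] : List String))).length = full.length := by simp
  apply List.ext_getElem
  · simp [pvAssign_length]
  · intro j hj1 hj2
    have hj : j < full.length := by
      rw [pvAssign_length, hlen] at hj1
      exact hj1
    have h := pvAssign_getD full already S _ hlen j (by simpa using hj)
    rw [List.getD_eq_getElem _ _ hj1] at h
    rw [h, List.getD_eq_getElem _ _ (by simpa using hj)]
    simp

theorem pvMain (S already full : List String) (ss : List String) :
    ∀ (k : Nat) (seen : List String),
    full.drop k = ss →
    (∀ f j, f ∈ S → f ∉ already → pvFirstIdx (pvBase f) full 0 = some j → j < k → f ∈ seen) →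
    pvDdp seen (ss.flatMap (fun s => S.filter (pvMatchA already s)))
      = pvDdp seen ((List.range' k (full.length - k)).flatMap
          (fun j => S.filter (pvMatchB already full j))) := by
  induction ss with
  | nil =>
    intro k seen hdrop _
    have hle : full.length ≤ k := by
      by_contra hlt
      rw [Nat.not_le] at hlt
      have := congrArg List.length hdrop
      simp [List.length_drop] at this
      omega
    have h0 : full.length - k = 0 := by omega
    simp [h0]
  | cons s ss ih =>
    intro k seen hdrop hseen
    have hk : k < full.length := by
      by_contra hge
      rw [Nat.not_lt] at hge
      rw [List.drop_eq_nil_of_le hge] at hdrop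
      exact absurd hdrop (by simp)
    have hsk : full[k] = s := by
      have h0 : (full.drop k)[0]'(by rw [hdrop]; simp) = s := by simp [hdrop]
      rw [List.getElem_drop] at h0
      simpa using h0
    have hdrop' : full.drop (k + 1) = ss := by
      have h1 : (full.drop k).drop 1 = full.drop (k + 1) := List.drop_drop
      rw [hdrop] at h1
      simpa using h1.symm
    have hcnt : full.length - k = (full.length - (k + 1)) + 1 := by omega
    rw [hcnt, List.range'_succ]
    simp only [List.flatMap_cons]
    rw [pvDdp_append, pvDdp_append]
    -- every field put in bucket k also matches suffix s = full[k]
    have hBsubA : ∀ f, pvMatchB already full k f = true → pvMatchA already s f = true := by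
      intro f hB
      simp only [pvMatchB, Bool.and_eq_true, decide_eq_true_eq, Bool.not_eq_true',
        decide_eq_false_iff_not] at hB
      obtain ⟨hna, hfi⟩ := hB
      obtain ⟨hk2, hend⟩ := pvFirstIdx_spec _ _ _ hfi
      rw [hsk] at hend
      unfold pvMatchA
      rw [hend]
      simp [hna]
    -- bucket k is the suffix-s block with the earlier-matched fields removed
    have hfilter : S.filter (pvMatchB already full k)
        = (S.filter (pvMatchA already s)).filter
            (fun f => decide (pvFirstIdx (pvBase f) full 0 = some k)) := by
      rw [List.filter_filter]
      apply List.filter_congr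
      intro f _
      simp only [pvMatchB, pvMatchA]
      cases hd : decide (pvFirstIdx (pvBase f) full 0 = some k) with
      | false => simp
      | true =>
        have hfi := of_decide_eq_true hd
        obtain ⟨hk2, hend⟩ := pvFirstIdx_spec _ _ _ hfi
        rw [hsk] at hend
        rw [hend]
        simp
    have hhead : pvDdp seen (S.filter (pvMatchA already s))
        = pvDdp seen (S.filter (pvMatchB already full k)) := by
      rw [hfilter]
      refine (pvDdp_filter _ _ _ ?_).symm
      intro f hf hpf
      rw [List.mem_filter] at hf
      obtain ⟨hfS, hfA⟩ := hf
      simp only [pvMatchA, Bool.and_eq_true, Bool.not_eq_true', decide_eq_false_iff_not] at hfA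
      obtain ⟨hna, hend⟩ := hfA
      rw [← hsk] at hend
      obtain ⟨j, hjk, hj⟩ := pvFirstIdx_exists_of_match _ _ _ hk hend
      have hjne : j ≠ k := by
        intro hEq
        subst hEq
        rw [hj] at hpf
        simp at hpf
      exact hseen f j hfS hna hj (by omega)
    have htail : pvDdp (S.filter (pvMatchA already s) ++ seen)
          (ss.flatMap (fun s => S.filter (pvMatchA already s)))
        = pvDdp (S.filter (pvMatchB already full k) ++ seen)
          ((List.range' (k + 1) (full.length - (k + 1))).flatMap
            (fun j => S.filter (pvMatchB already full j))) := by
      have hseen' : ∀ f j, f ∈ S → f ∉ already →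
          pvFirstIdx (pvBase f) full 0 = some j → j < k + 1 →
          f ∈ S.filter (pvMatchA already s) ++ seen := by
        intro f j hfS hna hfi hjk1
        by_cases hjk : j < k
        · exact List.mem_append_right _ (hseen f j hfS hna hfi hjk)
        · have hjEq : j = k := by omega
          subst hjEq
          obtain ⟨hk2, hend⟩ := pvFirstIdx_spec _ _ _ hfi
          rw [hsk] at hend
          refine List.mem_append_left _ ?_
          rw [List.mem_filter]
          exact ⟨hfS, by unfold pvMatchA; rw [hend]; simp [hna]⟩
      rw [ih (k + 1) (S.filter (pvMatchA already s) ++ seen) hdrop' hseen']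
      refine pvDdp_congr _ _ _ ?_
      intro x
      simp only [List.mem_append, List.mem_filter]
      constructor
      · rintro (⟨hxS, hxA⟩ | hx)
        · simp only [pvMatchA, Bool.and_eq_true, Bool.not_eq_true',
            decide_eq_false_iff_not] at hxA
          obtain ⟨hna, hend⟩ := hxA
          rw [← hsk] at hend
          obtain ⟨j, hjk, hj⟩ := pvFirstIdx_exists_of_match _ _ _ hk hend
          by_cases hjEq : j = k
          · subst hjEq
            exact Or.inl ⟨hxS, by simp [pvMatchB, hna, hj]⟩
          · exact Or.inr (hseen x j hxS hna hj (by omega))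
        · exact Or.inr hx
      · rintro (⟨hxS, hxB⟩ | hx)
        · exact Or.inl ⟨hxS, hBsubA x hxB⟩
        · exact Or.inr hx
    rw [hhead, htail]

-- ===== VERDICT (by name: the statement is the Claim_ definition above) =====
theorem select_by_suffix_py_spec : Claim_equal_select_by_suffix_py := by
  intro candidates suffixes limit already _
  show pvOuterA candidates already limit suffixes []
      = pvPickB limit (pvAssign suffixes already (pvSortedCands candidates)
          (suffixes.map (fun _ => ([] : List String)))) [] []
  rw [pvOuterA_eq, pvPickB_eq limit _ [] [] (by simp), pvBuckets_eq,
    ← List.flatMap_def, List.range_eq_range']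
  congr 1
  rw [← pvRun_ddp limit
      (suffixes.flatMap (fun s => (pvSortedCands candidates).filter (pvMatchA already s)))
      [] [] (by simp),
    ← pvRun_ddp limit
      ((List.range' 0 suffixes.length).flatMap
        (fun j => (pvSortedCands candidates).filter (pvMatchB already suffixes j)))
      [] [] (by simp)]
  congr 1
  have h := pvMain (pvSortedCands candidates) already suffixes suffixes 0 []
    (by simp) (by intro f j _ _ _ hj; omega)
  simpa using h
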